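-- pv_equiv track=rewrite | github.com/aCatasaurus/ProjectEuler | p8/adjprod.py | greatest_adjacent_product
-- ===== SOURCE A (Python) =====
-- from collections import deque
--
-- def greatest_adjacent_product(arr, run_len):
--     greatest = 1
--     nums = deque([], run_len)
--     front = iter(arr)
--
--     for _ in range(run_len):
--         num = next(front)
--         greatest *= num
--         nums.append(num)
--     current = greatest
--     best = tuple(nums)
--
--     for last, new in zip(arr, front):
--         nums.append(new)
--         if (new > last) or (last == 0):
--             current = prod(nums)
--             if current > greatest:
--                 greatest = current
--                 best = tuple(nums)
--
--     return best
--
-- def prod(it):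
--     p = 1
--     for x in it:
--         p *= x
--     return p
-- ===== SOURCE B (Python) =====
-- def greatest_adjacent_product(arr, run_len):
--     if run_len < 0 or run_len > len(arr):
--         raise ValueError("run_len must be between 0 and len(arr)")
--     window = arr[:run_len]
--     greatest = 1
--     p = 1
--     zeros = 0
--     for x in window:
--         greatest *= x
--         if x == 0:
--             zeros += 1
--         else:
--             p *= x
--     best_start = 0
--     i = 0
--     for out_x, in_x in zip(arr, arr[run_len:]):
--         i += 1
--         if out_x == 0:
--             zeros -= 1
--         else:
--             p //= out_x
--         if in_x == 0:
--             zeros += 1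
--         else:
--             p *= in_x
--         if in_x > out_x or out_x == 0:
--             cur = 0 if zeros else p
--             if cur > greatest:
--                 greatest = cur
--                 best_start = i
--     return tuple(arr[best_start:best_start + run_len])
-- ===== Notes on version B (the rewrite author's own statement) =====
-- stated objective: faster
-- what changed: A re-multiplies the whole deque window (prod(nums), O(run_len)) on every trigger; B maintains the window product incrementally in O(1) per step (divide the outgoing element out, multiply the incoming one in, with a separate zero count) and keeps only a best-start index, slicing the answer once at the end.
import Mathlib
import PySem

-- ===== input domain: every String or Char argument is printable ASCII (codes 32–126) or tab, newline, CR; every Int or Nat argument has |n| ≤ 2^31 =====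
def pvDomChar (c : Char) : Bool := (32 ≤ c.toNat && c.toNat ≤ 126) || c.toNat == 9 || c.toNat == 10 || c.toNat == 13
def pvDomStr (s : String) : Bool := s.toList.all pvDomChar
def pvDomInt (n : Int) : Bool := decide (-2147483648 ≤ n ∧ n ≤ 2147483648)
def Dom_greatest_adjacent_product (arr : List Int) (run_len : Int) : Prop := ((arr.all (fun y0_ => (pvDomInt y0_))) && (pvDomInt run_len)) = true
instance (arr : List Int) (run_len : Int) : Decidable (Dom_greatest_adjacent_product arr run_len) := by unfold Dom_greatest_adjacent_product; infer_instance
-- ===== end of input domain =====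

-- B replaces A's per-trigger O(run_len) window-product recomputation over a deque with an O(1)
-- incremental sliding product (divide the outgoing element out, multiply the incoming in, count
-- zeros separately) and a best-start index sliced once at the end. Return-value equivalence only.

-- ===== PORT A =====
-- prod(it) of Source A
def prodA (it : List Int) : Int := it.foldl (fun p x => p * x) 1

-- loop body of A's second for-loop; state = (nums, current, greatest, best);
-- nums is the deque with maxlen k: append, then drop from the left what exceeds k
def stepA (k : Nat) (st : List Int × Int × Int × List Int) (c : Int × Int) :
    List Int × Int × Int × List Int :=
  let nums := (st.1 ++ [c.2]).drop (st.1.length + 1 - k)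
  if c.2 > c.1 ∨ c.1 = 0 then
    let current := prodA nums
    if current > st.2.2.1 then (nums, current, current, nums)
    else (nums, current, st.2.2.1, st.2.2.2)
  else (nums, st.2.1, st.2.2.1, st.2.2.2)

def greatest_adjacent_product (arr : List Int) (run_len : Int) : List Int :=
  let k := run_len.toNat
  -- the first loop: run_len next() calls fill the deque and multiply into greatest
  let nums0 := arr.take k
  let g0 := prodA nums0
  -- for last, new in zip(arr, front): front has already yielded the first k elements
  ((List.zip arr (arr.drop k)).foldl (stepA k) (nums0, g0, g0, nums0)).2.2.2

-- ===== PORT B =====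
-- first loop of Source B; state = (greatest, p, zeros)
def stepInit (st : Int × Int × Int) (x : Int) : Int × Int × Int :=
  let g := st.1 * x
  if x = 0 then (g, st.2.1, st.2.2 + 1) else (g, st.2.1 * x, st.2.2)

-- second loop of Source B; state = (greatest, p, zeros, best_start, i)
def stepB (st : Int × Int × Int × Int × Int) (c : Int × Int) :
    Int × Int × Int × Int × Int :=
  let i := st.2.2.2.2 + 1
  let p1 := if c.1 = 0 then st.2.1 else PySem.Int.floordiv st.2.1 c.1
  let z1 := if c.1 = 0 then st.2.2.1 - 1 else st.2.2.1
  let p2 := if c.2 = 0 then p1 else p1 * c.2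
  let z2 := if c.2 = 0 then z1 + 1 else z1
  if c.2 > c.1 ∨ c.1 = 0 then
    let cur := if z2 ≠ 0 then 0 else p2
    if cur > st.1 then (cur, p2, z2, i, i) else (st.1, p2, z2, st.2.2.2.1, i)
  else (st.1, p2, z2, st.2.2.2.1, i)

def greatest_adjacent_product_alt (arr : List Int) (run_len : Int) : List Int :=
  -- B validates its natural domain and raises ValueError outside it; the raise is ported as []
  if run_len < 0 ∨ run_len > arr.length then [] else
  let window := PySem.List.slice arr none (some run_len)        -- arr[:run_len]
  let a := window.foldl stepInit (1, 1, 0)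
  let f := (List.zip arr (PySem.List.slice arr (some run_len) none)).foldl stepB
    (a.1, a.2.1, a.2.2, 0, 0)
  PySem.List.slice arr (some f.2.2.2.1) (some (f.2.2.2.1 + run_len))

-- ===== PRECONDITION & SPEC =====
-- A raises outside this: ValueError for run_len < 0 (deque maxlen), uncaught StopIteration for run_len > len(arr)
def Pre_greatest_adjacent_product (arr : List Int) (run_len : Int) : Prop :=
  0 ≤ run_len ∧ run_len ≤ arr.length
instance (arr : List Int) (run_len : Int) : Decidable (Pre_greatest_adjacent_product arr run_len) := by
  unfold Pre_greatest_adjacent_product; infer_instance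

def pvWitness_greatest_adjacent_product : List Int × Int := ([9, 8, 7, 6, 5], 3)

def Spec_greatest_adjacent_product (arr : List Int) (run_len : Int) (out : List Int) : Prop := out = greatest_adjacent_product_alt arr run_len
instance (arr : List Int) (run_len : Int) (out : List Int) : Decidable (Spec_greatest_adjacent_product arr run_len out) := by unfold Spec_greatest_adjacent_product; infer_instance

-- ===== CLAIM (what is proved, stated in full; the proofs are below) =====
def Claim_equal_greatest_adjacent_product : Prop := ∀ (arr : List Int) (run_len : Int), Dom_greatest_adjacent_product arr run_len → Pre_greatest_adjacent_product arr run_len → Spec_greatest_adjacent_product arr run_len (greatest_adjacent_product arr run_len)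

-- ===== LEMMAS AND PROOFS =====

-- product of the nonzero elements of a window
def pnz (w : List Int) : Int := (w.filter (fun x => x ≠ 0)).prod
-- number of zeros of a window
def zc (w : List Int) : Nat := w.countP (fun x => x = 0)

lemma foldl_mul_shift (w : List Int) : ∀ a : Int,
    w.foldl (fun p x => p * x) a = a * w.foldl (fun p x => p * x) 1 := by
  induction w with
  | nil => intro a; simp
  | cons x t ih =>
    intro a
    simp only [List.foldl_cons]
    rw [ih (a * x), ih (1 * x)]
    ring

lemma prodA_cons (x : Int) (w : List Int) : prodA (x :: w) = x * prodA w := by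
  simp only [prodA, List.foldl_cons]
  rw [foldl_mul_shift]
  ring

lemma prodA_eq (w : List Int) : prodA w = if zc w = 0 then pnz w else 0 := by
  induction w with
  | nil => simp [prodA, pnz, zc]
  | cons x t ih =>
    rw [prodA_cons, ih]
    by_cases hx : x = 0 <;>
      simp [pnz, zc, hx]

lemma pnz_cons (x : Int) (w : List Int) :
    pnz (x :: w) = (if x = 0 then 1 else x) * pnz w := by
  by_cases hx : x = 0 <;> simp [pnz, hx]

lemma pnz_append (w : List Int) (x : Int) :
    pnz (w ++ [x]) = pnz w * (if x = 0 then 1 else x) := by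
  by_cases hx : x = 0 <;> simp [pnz, hx]

lemma zc_cons (x : Int) (w : List Int) :
    zc (x :: w) = (if x = 0 then 1 else 0) + zc w := by
  by_cases hx : x = 0 <;> simp [zc, hx, Nat.add_comm]

lemma zc_append (w : List Int) (x : Int) :
    zc (w ++ [x]) = zc w + (if x = 0 then 1 else 0) := by
  by_cases hx : x = 0 <;> simp [zc, List.countP_append, hx]

lemma fdiv_cancel (a b : Int) (h : a ≠ 0) : PySem.Int.floordiv (a * b) a = b := by
  simp [PySem.Int.floordiv]
  exact Int.mul_fdiv_cancel_left b h

-- Source B's first loop computes (prod, nonzero-prod, zero-count) of the window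
lemma initB_eq (w : List Int) : ∀ (g p z : Int),
    w.foldl stepInit (g, p, z) = (g * prodA w, p * pnz w, z + (zc w : Int)) := by
  induction w with
  | nil => intro g p z; simp [prodA, pnz, zc]
  | cons x t ih =>
    intro g p z
    simp only [List.foldl_cons, stepInit]
    by_cases hx : x = 0
    · rw [if_pos hx, ih, prodA_cons, pnz_cons, zc_cons, hx]
      refine Prod.ext ?_ (Prod.ext ?_ ?_) <;> simp <;> ring
    · rw [if_neg hx, ih, prodA_cons, pnz_cons, zc_cons]
      refine Prod.ext ?_ (Prod.ext ?_ ?_) <;> simp [hx] <;> ring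

-- a slice of width 0 is empty
lemma slice_zero_width (arr : List Int) (t : Int) :
    PySem.List.slice arr (some t) (some (t + ((0 : Nat) : Int))) = [] := by
  apply List.length_eq_zero_iff.mp
  rw [PySem.List.length_slice]
  simp

-- the k = 0 case of A's loop: the deque stays empty and best stays []
lemma foldA_zero (l : List Int) : ∀ cur : Int,
    (List.foldl (stepA 0) ([], cur, 1, []) (List.zip l l)).2.2.2 = [] := by
  induction l with
  | nil => intro cur; simp
  | cons x t ih =>
    intro cur
    simp only [List.zip_cons_cons, List.foldl_cons]
    have hstep : stepA 0 ([], cur, 1, []) (x, x) = ([], if x > x ∨ x = 0 then 1 else cur, 1, []) := by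
      simp only [stepA]
      split_ifs with h
      · simp [prodA]
      · simp [prodA]
      · rfl
    rw [hstep]
    split_ifs <;> exact ih _

-- the main simulation: A's deque loop and B's incremental loop,
-- run from position i on matching states, end with the same best window
lemma loop_eq (arr : List Int) (k : Nat) (hk : 0 < k) :
    ∀ (m i : Nat), i + k + m = arr.length →
    ∀ (cur g : Int) (s : Nat), s + k ≤ arr.length →
    ∃ s' : Nat, s' + k ≤ arr.length ∧
      (List.foldl (stepA k) ((arr.drop i).take k, cur, g, (arr.drop s).take k)
        (List.zip (arr.drop i) (arr.drop (i + k)))).2.2.2 = (arr.drop s').take k ∧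
      (List.foldl stepB (g, pnz ((arr.drop i).take k), (zc ((arr.drop i).take k) : Int), (s : Int), (i : Int))
        (List.zip (arr.drop i) (arr.drop (i + k)))).2.2.2.1 = (s' : Int) := by
  intro m
  induction m with
  | zero =>
    intro i hlen cur g s hs
    have hnil : arr.drop (i + k) = [] := by
      apply List.drop_eq_nil_of_le; omega
    refine ⟨s, hs, ?_, ?_⟩ <;> simp [hnil]
  | succ m ih =>
    intro i hlen cur g s hs
    have hi : i < arr.length := by omega
    have hik : i + k < arr.length := by omega
    have hdi : arr.drop i = arr[i] :: arr.drop (i + 1) := List.drop_eq_getElem_cons hi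
    have hdik : arr.drop (i + k) = arr[i + k] :: arr.drop (i + k + 1) := List.drop_eq_getElem_cons hik
    -- window notation
    set Wi := (arr.drop i).take k with hWi
    set Wn := (arr.drop (i + 1)).take k with hWn
    set T := (arr.drop (i + 1)).take (k - 1) with hT
    -- head decomposition of the current window
    have hhead : Wi = arr[i] :: T := by
      rw [hWi, hT, hdi]
      obtain ⟨k', rfl⟩ : ∃ k', k = k' + 1 := ⟨k - 1, by omega⟩
      simp only [List.take_succ_cons, Nat.add_sub_cancel]
    -- tail decomposition of the next window
    have htail : Wn = T ++ [arr[i + k]] := by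
      rw [hWn, hT]
      obtain ⟨k', rfl⟩ : ∃ k', k = k' + 1 := ⟨k - 1, by omega⟩
      rw [List.take_add_one]
      congr 1
      have hlt : k' < (arr.drop (i + 1)).length := by
        rw [List.length_drop]; omega
      rw [List.getElem?_eq_getElem hlt]
      simp [List.getElem_drop]
      congr 1
      omega
    have hlenWi : Wi.length = k := by
      rw [hWi, List.length_take, List.length_drop]; omega
    -- A's deque update lands on the next window
    have hnums : (Wi ++ [arr[i + k]]).drop (Wi.length + 1 - k) = Wn := by
      rw [hlenWi, hhead, htail]
      simp
    -- B's product/zero updates land on the next window's invariants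
    have hp2 : ∀ p1, p1 = pnz T → (if (arr[i + k] : Int) = 0 then p1 else p1 * arr[i + k]) = pnz Wn := by
      intro p1 hp1
      rw [htail, pnz_append, hp1]
      split_ifs <;> simp
    have hz2 : ∀ z1 : Int, z1 = (zc T : Int) → (if (arr[i + k] : Int) = 0 then z1 + 1 else z1) = (zc Wn : Int) := by
      intro z1 hz1
      rw [htail, zc_append, hz1]
      split_ifs <;> push_cast <;> ring
    have hp1 : (if (arr[i] : Int) = 0 then pnz Wi else PySem.Int.floordiv (pnz Wi) arr[i]) = pnz T := by
      rw [hhead, pnz_cons]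
      split_ifs with h
      · simp
      · exact fdiv_cancel _ _ h
    have hz1 : (if (arr[i] : Int) = 0 then ((zc Wi : Int)) - 1 else (zc Wi : Int)) = (zc T : Int) := by
      rw [hhead, zc_cons]
      split_ifs with h <;> push_cast <;> ring
    -- one synchronized step, then the induction hypothesis
    rw [hdi, hdik, List.zip_cons_cons]
    simp only [List.foldl_cons]
    have hstepA : stepA k (Wi, cur, g, (arr.drop s).take k) (arr[i], arr[i + k]) =
        if (arr[i + k] : Int) > arr[i] ∨ (arr[i] : Int) = 0 then
          (if prodA Wn > g then (Wn, prodA Wn, prodA Wn, Wn)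
           else (Wn, prodA Wn, g, (arr.drop s).take k))
        else (Wn, cur, g, (arr.drop s).take k) := by
      simp only [stepA, hnums]
    have hcur : (if ((zc Wn : Int)) ≠ 0 then (0 : Int) else pnz Wn) = prodA Wn := by
      rw [prodA_eq]
      split_ifs with h1 h2 <;> simp_all
    have hstepB : stepB (g, pnz Wi, (zc Wi : Int), (s : Int), (i : Int)) (arr[i], arr[i + k]) =
        if (arr[i + k] : Int) > arr[i] ∨ (arr[i] : Int) = 0 then
          (if prodA Wn > g then (prodA Wn, pnz Wn, (zc Wn : Int), ((i : Int) + 1), ((i : Int) + 1))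
           else (g, pnz Wn, (zc Wn : Int), (s : Int), ((i : Int) + 1)))
        else (g, pnz Wn, (zc Wn : Int), (s : Int), ((i : Int) + 1)) := by
      simp only [stepB, hp1, hz1, hp2 _ rfl, hz2 _ rfl, hcur]
    rw [hstepA, hstepB]
    have hi1 : ((i : Int) + 1) = ((i + 1 : Nat) : Int) := by push_cast; ring
    have hlen' : (i + 1) + k + m = arr.length := by omega
    have hdip : arr.drop (i + k + 1) = arr.drop ((i + 1) + k) := by congr 1; omega
    by_cases hc : (arr[i + k] : Int) > arr[i] ∨ (arr[i] : Int) = 0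
    · rw [if_pos hc, if_pos hc]
      by_cases hb : prodA Wn > g
      · rw [if_pos hb, if_pos hb]
        rw [hi1, hdip]
        exact ih (i + 1) hlen' (prodA Wn) (prodA Wn) (i + 1) (by omega)
      · rw [if_neg hb, if_neg hb]
        rw [hi1, hdip]
        exact ih (i + 1) hlen' (prodA Wn) g s hs
    · rw [if_neg hc, if_neg hc]
      rw [hi1, hdip]
      exact ih (i + 1) hlen' cur g s hs

-- ===== VERDICT (by name: the statement is the Claim_ definition above) =====
theorem greatest_adjacent_product_spec : Claim_equal_greatest_adjacent_product := by
  intro arr run_len _hdom hpre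
  obtain ⟨h0, hle⟩ := hpre
  unfold Spec_greatest_adjacent_product
  rw [greatest_adjacent_product_alt, if_neg (by omega)]
  obtain ⟨k, rfl⟩ : ∃ k : Nat, run_len = (k : Int) := ⟨run_len.toNat, (Int.toNat_of_nonneg h0).symm⟩
  have hkn : k ≤ arr.length := by exact_mod_cast hle
  simp only [greatest_adjacent_product,
    PySem.List.slice_to_natCast, PySem.List.slice_from_natCast, Int.toNat_natCast]
  rcases Nat.eq_zero_or_pos k with hk0 | hk
  · -- run_len = 0: A's best stays [], B's final slice has length 0
    subst hk0
    have hp : prodA ([] : List Int) = 1 := by simp [prodA]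
    simp only [List.drop_zero, List.take_zero, hp, List.foldl_nil]
    rw [foldA_zero arr 1]
    exact (slice_zero_width arr _).symm
  · -- run_len = k > 0: the simulation lemma from position 0
    have hinit := initB_eq (arr.take k) 1 1 0
    obtain ⟨s', hs', hA, hB⟩ := loop_eq arr k hk (arr.length - k) 0 (by omega)
      (prodA ((arr.drop 0).take k)) (prodA ((arr.drop 0).take k)) 0 (by omega)
    simp only [List.drop_zero, Nat.zero_add, Nat.cast_zero] at hA hB
    rw [hinit]
    simp only [one_mul, zero_add]
    rw [hA, hB, PySem.List.slice_natCast_add]
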